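-- pv_equiv track=rewrite | github.com/Jaehyeon1020/ps-study | 프로그래머스/unrated/135808. 과일 장수/과일 장수.py | solution
-- ===== SOURCE A (Python) =====
-- def solution(k, m, score):
--     answer = 0
--
--     remain = len(score)
--     inbox = 0
--     box = []
--     score.sort(reverse=True)
--
--     for s in score:
--         box.append(s)
--         inbox += 1
--
--         if inbox == m:
--             mini = min(box)
--             answer += mini * m
--             inbox = 0
--             box.clear()
--
--     return answer
-- ===== SOURCE B (Python) =====
-- def solution(k, m, score):
--     score.sort(reverse=True)
--     if m <= 0:
--         return 0
--     return sum(score[i] * m for i in range(m - 1, len(score), m))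
-- ===== Notes on version B (the rewrite author's own statement) =====
-- stated objective: simpler
-- what changed: B replaces A's box buffer, inbox counter and per-box min scan by a single strided index sum over the descending-sorted list (score[i]*m for i = m-1, 2m-1, ...), returning 0 outright when m <= 0 just as A's never-filling loop does; no auxiliary list or counter is maintained.
import Mathlib
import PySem

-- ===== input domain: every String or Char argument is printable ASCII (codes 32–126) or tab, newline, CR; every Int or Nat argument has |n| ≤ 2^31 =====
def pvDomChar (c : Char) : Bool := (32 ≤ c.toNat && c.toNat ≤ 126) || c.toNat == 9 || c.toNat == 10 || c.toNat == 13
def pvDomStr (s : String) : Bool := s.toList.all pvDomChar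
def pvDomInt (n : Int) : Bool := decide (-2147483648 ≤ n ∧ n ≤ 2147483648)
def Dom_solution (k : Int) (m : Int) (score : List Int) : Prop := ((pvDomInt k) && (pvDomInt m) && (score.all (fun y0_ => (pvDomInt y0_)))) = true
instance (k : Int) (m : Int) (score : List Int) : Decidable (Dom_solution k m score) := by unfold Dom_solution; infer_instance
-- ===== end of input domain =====

-- B replaces A's box buffer / inbox counter / per-box min scan by a strided index sum
-- over the descending-sorted list (and returns 0 outright for m <= 0, as A does).
-- Objective: simpler.  Both Pythons sort `score` in place (same mutation); the
-- theorems are about the return value.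

-- ===== PORT A =====
-- state: (answer, inbox, box); min(box) is ported as (min? box).getD 0 — box is
-- nonempty whenever the branch fires (we just appended), so the default is never used.
def solution (k : Int) (m : Int) (score : List Int) : Int :=
  let sorted := PySem.List.sorted score (fun x => x) true
  (sorted.foldl (fun (st : Int × Int × List Int) s =>
      let box := st.2.2 ++ [s]
      let inbox := st.2.1 + 1
      if inbox = m then
        (st.1 + ((PySem.List.min? box (fun x => x)).getD 0) * m, 0, ([] : List Int))
      else
        (st.1, inbox, box)) (0, 0, [])).1

-- ===== PORT B =====
def solution_alt (k : Int) (m : Int) (score : List Int) : Int :=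
  let sorted := PySem.List.sorted score (fun x => x) true
  if m ≤ 0 then 0
  else
    (PySem.List.pyRange (m - 1) (sorted.length : Int) m).foldl
      (fun answer i => answer + (PySem.List.pyGetD sorted i 0) * m) 0

-- ===== PRECONDITION & SPEC =====
def Spec_solution (k : Int) (m : Int) (score : List Int) (out : Int) : Prop := out = solution_alt k m score
instance (k : Int) (m : Int) (score : List Int) (out : Int) : Decidable (Spec_solution k m score out) := by unfold Spec_solution; infer_instance

-- ===== CLAIM (what is proved, stated in full; the proofs are below) =====
def Claim_equal_solution : Prop := ∀ (k : Int) (m : Int) (score : List Int), Dom_solution k m score → Spec_solution k m score (solution k m score)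

-- ===== LEMMAS AND PROOFS =====

-- abbreviation for A's loop body, used only in the proofs
def stepA (m : Int) (st : Int × Int × List Int) (s : Int) : Int × Int × List Int :=
  let box := st.2.2 ++ [s]
  let inbox := st.2.1 + 1
  if inbox = m then
    (st.1 + ((PySem.List.min? box (fun x => x)).getD 0) * m, 0, ([] : List Int))
  else
    (st.1, inbox, box)

theorem solution_eq_stepA (k m : Int) (score : List Int) :
    solution k m score =
      ((PySem.List.sorted score (fun x => x) true).foldl (stepA m) (0, 0, [])).1 := rfl

-- with m ≤ 0 the box branch never fires (inbox stays positive along the loop)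
theorem foldA_nonpos (m : Int) (hm : m ≤ 0) :
    ∀ (c : List Int) (a inbox : Int) (box : List Int),
      0 ≤ inbox → (c.foldl (stepA m) (a, inbox, box)).1 = a := by
  intro c
  induction c with
  | nil => intro a inbox box _; rfl
  | cons x t ih =>
    intro a inbox box h0
    have hne : ¬ (inbox + 1 = m) := by omega
    simp only [List.foldl_cons, stepA, hne, if_false]
    exact ih a (inbox + 1) (box ++ [x]) (by omega)

-- A's fold never fires the box branch while fewer than m - inbox elements remain
theorem foldA_short (m : Int) :
    ∀ (c : List Int) (a inbox : Int) (box : List Int),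
      0 ≤ inbox → inbox + c.length < m →
      (c.foldl (stepA m) (a, inbox, box)).1 = a := by
  intro c
  induction c with
  | nil => intro a inbox box _ _; rfl
  | cons x t ih =>
    intro a inbox box h0 hlen
    have hne : ¬ (inbox + 1 = m) := by
      simp only [List.length_cons] at hlen; omega
    simp only [List.foldl_cons, stepA, hne, if_false]
    exact ih a (inbox + 1) (box ++ [x]) (by omega)
      (by simp only [List.length_cons] at hlen; push_cast at hlen ⊢; omega)

-- A's fold consumes exactly one full box
theorem foldA_fill (m : Int) :
    ∀ (c : List Int) (l : List Int) (a inbox : Int) (box : List Int),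
      0 ≤ inbox → inbox < m → inbox + c.length = m →
      (c ++ l).foldl (stepA m) (a, inbox, box) =
        l.foldl (stepA m)
          (a + ((PySem.List.min? (box ++ c) (fun x => x)).getD 0) * m, 0, []) := by
  intro c
  induction c with
  | nil =>
    intro l a inbox box h0 hlt hm
    simp only [List.length_nil, Nat.cast_zero, add_zero] at hm; omega
  | cons x t ih =>
    intro l a inbox box h0 hlt hm
    simp only [List.cons_append, List.foldl_cons]
    by_cases hfire : inbox + 1 = m
    · have ht : t = [] := by
        simp only [List.length_cons] at hm
        have : (t.length : Int) = 0 := by push_cast at hm; omega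
        exact List.eq_nil_of_length_eq_zero (by exact_mod_cast this)
      subst ht
      simp only [stepA, hfire, if_true, List.nil_append]
    · simp only [stepA, hfire, if_false]
      have := ih l a (inbox + 1) (box ++ [x]) (by omega)
        (by simp only [List.length_cons] at hm; push_cast at hm; omega)
        (by simp only [List.length_cons] at hm; push_cast at hm ⊢; omega)
      simpa [List.append_assoc] using this

-- range recursion for a positive step: empty and cons forms, and a shift form
theorem pyRange_pos_nil {s : Int} (a b : Int) (hs : 0 < s) (hab : b ≤ a) :
    PySem.List.pyRange a b s = [] := by
  rw [PySem.List.pyRange_of_pos a b hs]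
  simp [show ¬ a < b by omega]

theorem pyRange_pos_cons {s : Int} (a b : Int) (hs : 0 < s) (hab : a < b) :
    PySem.List.pyRange a b s = a :: PySem.List.pyRange (a + s) b s := by
  rw [PySem.List.pyRange_of_pos a b hs, PySem.List.pyRange_of_pos (a + s) b hs]
  have hcount : (if a < b then ((b - a + s - 1) / s).toNat else 0)
      = (if a + s < b then ((b - (a + s) + s - 1) / s).toNat else 0) + 1 := by
    simp only [if_pos hab]
    by_cases h2 : a + s < b
    · simp only [if_pos h2]
      have : b - a + s - 1 = (b - (a + s) + s - 1) + 1 * s := by ring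
      rw [this, Int.add_mul_ediv_right _ _ (by omega : s ≠ 0)]
      have hnn : 0 ≤ b - (a + s) + s - 1 := by omega
      have : 0 ≤ (b - (a + s) + s - 1) / s := Int.ediv_nonneg hnn (by omega)
      omega
    · simp only [if_neg h2]
      have h1 : 0 ≤ b - a - 1 := by omega
      have h2' : b - a - 1 < s := by omega
      have : (b - a + s - 1) / s = (b - a - 1) / s + 1 := by
        have : b - a + s - 1 = (b - a - 1) + 1 * s := by ring
        rw [this, Int.add_mul_ediv_right _ _ (by omega : s ≠ 0)]
      rw [this, Int.ediv_eq_zero_of_lt h1 h2']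
      decide
  rw [hcount, List.range_succ_eq_map, List.map_cons, List.map_map]
  simp only [Nat.cast_zero, mul_zero, add_zero]
  congr 1
  apply List.map_congr_left
  intro i _
  simp only [Function.comp_apply]
  push_cast
  ring

theorem pyRange_pos_shift {s : Int} (a b : Int) (hs : 0 < s) :
    PySem.List.pyRange (a + s) b s = (PySem.List.pyRange a (b - s) s).map (· + s) := by
  rw [PySem.List.pyRange_of_pos (a + s) b hs, PySem.List.pyRange_of_pos a (b - s) hs]
  have : (if a + s < b then ((b - (a + s) + s - 1) / s).toNat else 0)
      = (if a < b - s then ((b - s - a + s - 1) / s).toNat else 0) := by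
    by_cases h : a + s < b
    · rw [if_pos h, if_pos (by omega)]; congr 2; ring
    · rw [if_neg h, if_neg (by omega)]
  rw [this, List.map_map]
  apply List.map_congr_left
  intro i _
  simp only [Function.comp_apply]
  ring

-- foldl min over a non-increasing list reaches its last element
theorem foldl_min_nonincr :
    ∀ (t : List Int) (x : Int), (x :: t).Pairwise (fun a b => b ≤ a) →
      t.foldl min x = (x :: t).getLast (by simp) := by
  intro t
  induction t with
  | nil => intro x _; rfl
  | cons y u ih =>
    intro x hp
    have hyx : y ≤ x := (List.pairwise_cons.mp hp).1 y (by simp)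
    have hp' : (y :: u).Pairwise (fun a b => b ≤ a) := (List.pairwise_cons.mp hp).2
    simp only [List.foldl_cons, min_eq_right hyx]
    rw [ih y hp']
    simp [List.getLast_cons]

-- min of the first n elements of a non-increasing list is its (n-1)-th element
theorem min_take_eq_getD (l : List Int) (hp : l.Pairwise (fun a b => b ≤ a)) (n : Nat)
    (hn : 0 < n) (hlen : n ≤ l.length) :
    (PySem.List.min? (l.take n) (fun x => x)).getD 0 = l.getD (n - 1) 0 := by
  obtain ⟨x, t, hxt⟩ : ∃ x t, l.take n = x :: t := by
    cases hl : l.take n with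
    | nil =>
      exfalso
      have : (l.take n).length = n := by simp [Nat.min_eq_left hlen]
      rw [hl] at this; simp at this; omega
    | cons x t => exact ⟨x, t, rfl⟩
  have hlen' : (x :: t).length = n := by
    rw [← hxt]; simp [Nat.min_eq_left hlen]
  rw [hxt, PySem.List.min?_id_cons, Option.getD_some]
  have hptake : (x :: t).Pairwise (fun a b => b ≤ a) := by
    rw [← hxt]; exact hp.sublist (List.take_sublist n l)
  rw [foldl_min_nonincr t x hptake]
  have h1 : (x :: t)[(x :: t).length - 1]? = l[n - 1]? := by
    rw [hlen', ← hxt, List.getElem?_take_of_lt (by omega)]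
  rw [List.getLast_eq_getElem, List.getD_eq_getElem?_getD, ← h1,
    List.getElem?_eq_getElem (by omega)]
  simp

-- the crux: on any non-increasing list, A's loop from a clean state equals B's strided sum
theorem main_lemma (m : Int) (hm : 0 < m) :
    ∀ (n : Nat) (l : List Int), l.length = n → l.Pairwise (fun a b => b ≤ a) → ∀ (a : Int),
      (l.foldl (stepA m) (a, 0, [])).1 =
        (PySem.List.pyRange (m - 1) (l.length : Int) m).foldl
          (fun answer i => answer + (PySem.List.pyGetD l i 0) * m) a := by
  intro n
  induction n using Nat.strong_induction_on with
  | _ n ih =>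
    intro l hln hp a
    by_cases hshort : (l.length : Int) < m
    · rw [foldA_short m l a 0 [] le_rfl (by omega),
        pyRange_pos_nil (m - 1) (l.length : Int) hm (by omega), List.foldl_nil]
    · rw [not_lt] at hshort
      have hmnat : m.toNat ≤ l.length := by omega
      have hmpos : 0 < m.toNat := by omega
      -- split l into its first box and the rest
      have hsplit : l = l.take m.toNat ++ l.drop m.toNat := (List.take_append_drop _ _).symm
      have hclen : ((l.take m.toNat).length : Int) = m := by
        simp [Nat.min_eq_left hmnat]; omega
      -- A's side: consume one box
      have hA : (l.foldl (stepA m) (a, 0, [])).1 =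
          ((l.drop m.toNat).foldl (stepA m)
            (a + ((PySem.List.min? (l.take m.toNat) (fun x => x)).getD 0) * m, 0, [])).1 := by
        conv_lhs => rw [hsplit]
        rw [foldA_fill m (l.take m.toNat) (l.drop m.toNat) a 0 [] le_rfl hm
          (by rw [hclen]; ring)]
        simp
      rw [hA]
      -- the min of the first box is l[m-1]
      have hmin : (PySem.List.min? (l.take m.toNat) (fun x => x)).getD 0
          = PySem.List.pyGetD l (m - 1) 0 := by
        rw [min_take_eq_getD l hp m.toNat hmpos hmnat,
          PySem.List.pyGetD_of_nonneg l 0 (by omega : (0:Int) ≤ m - 1)]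
        congr 1
        omega
      -- B's side: peel the first index off the range
      have hdl : ((l.drop m.toNat).length : Int) = (l.length : Int) - m := by
        simp [List.length_drop]; omega
      rw [pyRange_pos_cons (m - 1) (l.length : Int) hm (by omega), List.foldl_cons,
        pyRange_pos_shift (m - 1) (l.length : Int) hm, List.foldl_map]
      -- indices in the shifted range address the dropped list
      have hcongr :
          (PySem.List.pyRange (m - 1) ((l.length : Int) - m) m).foldl
            (fun answer i => answer + (PySem.List.pyGetD l (i + m) 0) * m)
            (a + PySem.List.pyGetD l (m - 1) 0 * m)
          = (PySem.List.pyRange (m - 1) ((l.length : Int) - m) m).foldl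
            (fun answer i => answer + (PySem.List.pyGetD (l.drop m.toNat) i 0) * m)
            (a + PySem.List.pyGetD l (m - 1) 0 * m) := by
        apply PySem.List.foldl_congr_mem
        intro acc i hi
        have hmem := (PySem.List.mem_pyRange_iff_of_pos hm i).mp hi
        have hge : 0 ≤ i := by omega
        have hlt : i < (l.length : Int) - m := hmem.2.1
        congr 1
        rw [PySem.List.pyGetD_of_nonneg l 0 (by omega : (0:Int) ≤ i + m),
          PySem.List.pyGetD_of_nonneg (l.drop m.toNat) 0 hge,
          List.getD_eq_getElem?_getD, List.getD_eq_getElem?_getD, List.getElem?_drop]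
        have hidx : (i + m).toNat = m.toNat + i.toNat := by omega
        rw [hidx]
      rw [hmin, hcongr]
      -- recurse on the dropped list
      have hrec := ih (l.drop m.toNat).length (by omega) (l.drop m.toNat) rfl
        (hp.sublist (List.drop_sublist m.toNat l))
        (a + PySem.List.pyGetD l (m - 1) 0 * m)
      rw [← hdl]
      exact hrec.symm ▸ rfl

theorem solution_spec_aux (k m : Int) (score : List Int) :
    solution k m score = solution_alt k m score := by
  rw [solution_eq_stepA, solution_alt]
  by_cases hm : m ≤ 0
  · simp only [if_pos hm]
    exact foldA_nonpos m hm _ 0 0 [] le_rfl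
  · simp only [if_neg hm]
    exact main_lemma m (by omega) _ _ rfl
      (PySem.List.sorted_pairwise_rev score (fun x => x)) 0

-- ===== VERDICT (by name: the statement is the Claim_ definition above) =====
theorem solution_spec : Claim_equal_solution := by
  intro k m score _
  exact solution_spec_aux k m score
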